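-- pv_equiv track=rewrite | github.com/KleinTong/Daily-Coding-Problem-Solution | see_setting_sun/main.py | get_building_setting_sun_forward
-- ===== SOURCE A (Python) =====
-- def get_building_setting_sun_forward(arr):
--     partly_high_building = []
--     for i in arr:
--         term = [i]
--         for build in partly_high_building:
--             if build > i:
--                 term.append(build)
--         partly_high_building = term
--
--     return partly_high_building
-- ===== SOURCE B (Python) =====
-- def get_building_setting_sun_forward(arr):
--     res = []
--     cur = None
--     for x in reversed(arr):
--         if cur is None or x > cur:
--             res.append(x)
--             cur = x
--     return res
-- ===== Notes on version B (the rewrite author's own statement) =====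
-- stated objective: faster
-- what changed: Replaced A's rebuild-and-filter of the kept-buildings list at every element (quadratic) by a single right-to-left pass tracking the running maximum and appending each element that exceeds it.
import Mathlib
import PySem

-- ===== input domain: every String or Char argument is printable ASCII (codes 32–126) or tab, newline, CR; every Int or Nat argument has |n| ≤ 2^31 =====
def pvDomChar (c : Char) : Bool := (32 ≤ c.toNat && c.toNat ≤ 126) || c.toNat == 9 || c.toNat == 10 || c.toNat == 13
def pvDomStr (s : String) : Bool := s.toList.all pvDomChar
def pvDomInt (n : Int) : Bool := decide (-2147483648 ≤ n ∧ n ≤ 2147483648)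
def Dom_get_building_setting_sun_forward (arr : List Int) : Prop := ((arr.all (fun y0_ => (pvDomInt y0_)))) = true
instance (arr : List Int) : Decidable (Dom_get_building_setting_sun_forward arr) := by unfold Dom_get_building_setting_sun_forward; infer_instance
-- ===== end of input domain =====

-- B replaces A's rebuild-and-filter of the kept list at every element by one
-- right-to-left pass with a running maximum.

-- ===== PORT A =====
def get_building_setting_sun_forward (arr : List Int) : List Int :=
  arr.foldl (fun partly_high_building i =>
    partly_high_building.foldl
      (fun term build => if build > i then term ++ [build] else term) [i]) []

-- ===== PORT B =====
-- state (res, cur): 'if cur is None or x > cur: res.append(x); cur = x'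
def pvAltStep (st : List Int × Option Int) (x : Int) : List Int × Option Int :=
  match st with
  | (res, none) => (res ++ [x], some x)
  | (res, some c) => if x > c then (res ++ [x], some x) else (res, some c)

def get_building_setting_sun_forward_alt (arr : List Int) : List Int :=
  (arr.reverse.foldl pvAltStep ([], none)).1

-- ===== PRECONDITION & SPEC =====
def Spec_get_building_setting_sun_forward (arr : List Int) (out : List Int) : Prop := out = get_building_setting_sun_forward_alt arr
instance (arr : List Int) (out : List Int) : Decidable (Spec_get_building_setting_sun_forward arr out) := by unfold Spec_get_building_setting_sun_forward; infer_instance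

-- ===== CLAIM (what is proved, stated in full; the proofs are below) =====
def Claim_equal_get_building_setting_sun_forward : Prop := ∀ (arr : List Int), Dom_get_building_setting_sun_forward arr → Spec_get_building_setting_sun_forward arr (get_building_setting_sun_forward arr)

-- ===== LEMMAS AND PROOFS =====

-- A's inner loop keeps exactly the buildings strictly taller than i, after i itself.
theorem pvA_step (s : List Int) (i : Int) :
    s.foldl (fun term build => if build > i then term ++ [build] else term) [i]
      = i :: s.filter (fun b => decide (i < b)) := by
  simpa using PySem.List.foldl_append_if_eq_filter
    (l := s) (acc := ([i] : List Int)) (p := fun b => decide (i < b))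

theorem pvA_snoc (l : List Int) (x : Int) :
    get_building_setting_sun_forward (l ++ [x])
      = x :: (get_building_setting_sun_forward l).filter (fun b => decide (x < b)) := by
  unfold get_building_setting_sun_forward
  rw [List.foldl_append]
  simpa using pvA_step
    (l.foldl (fun partly_high_building i =>
      partly_high_building.foldl
        (fun term build => if build > i then term ++ [build] else term) [i]) []) x

theorem pv_le_foldl_max (l : List Int) (m : Int) : m ≤ l.foldl max m := by
  induction l generalizing m with
  | nil => simp
  | cons a t ih => exact le_trans (le_max_left m a) (ih (m ⊔ a))

theorem pv_foldl_max_snoc (l : List Int) (m x : Int) (h : m ≤ x) :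
    (l.foldl max m) ⊔ x = l.foldl max x := by
  induction l generalizing m x with
  | nil => simpa using max_eq_right h
  | cons a t ih =>
      simp only [List.foldl_cons]
      rcases le_total a x with hax | hxa
      · rw [ih _ _ (sup_le h hax), max_eq_left hax]
      · rw [max_eq_right (le_trans h hxa), max_eq_right hxa]
        exact max_eq_left (le_trans hxa (pv_le_foldl_max t a))

-- Main invariant: B's fold over reverse l, started with running max m, appends exactly
-- A's result filtered to the elements above m, and ends with the max of m and l.
theorem pvB_inv (l : List Int) (m : Int) (acc : List Int) :
    l.reverse.foldl pvAltStep (acc, some m)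
      = (acc ++ (get_building_setting_sun_forward l).filter (fun b => decide (m < b)),
         some (l.foldl max m)) := by
  induction l using List.reverseRecOn generalizing m acc with
  | nil => simp [get_building_setting_sun_forward]
  | append_singleton t x ih =>
      rw [List.reverse_append, pvA_snoc]
      simp only [List.reverse_singleton, List.singleton_append, List.foldl_cons,
        List.foldl_append, List.foldl_nil]
      by_cases hx : m < x
      · rw [show pvAltStep (acc, some m) x = (acc ++ [x], some x) by simp [pvAltStep, hx]]
        rw [ih, List.filter_cons_of_pos (by simpa using hx), List.filter_filter]
        have hfil : (get_building_setting_sun_forward t).filter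
              (fun b => decide (m < b) && decide (x < b))
            = (get_building_setting_sun_forward t).filter (fun b => decide (x < b)) := by
          apply List.filter_congr
          intro b _
          by_cases hb : x < b
          · simp [hb, lt_trans hx hb]
          · simp [hb]
        rw [hfil, ← pv_foldl_max_snoc t m x (le_of_lt hx)]
        simp
      · rw [show pvAltStep (acc, some m) x = (acc, some m) by simp [pvAltStep, hx]]
        rw [ih, List.filter_cons_of_neg (by simpa using hx), List.filter_filter]
        have hxm : x ≤ m := le_of_not_gt hx
        have hfil : (get_building_setting_sun_forward t).filter
              (fun b => decide (m < b) && decide (x < b))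
            = (get_building_setting_sun_forward t).filter (fun b => decide (m < b)) := by
          apply List.filter_congr
          intro b _
          by_cases hb : m < b
          · simp [hb, lt_of_le_of_lt hxm hb]
          · simp [hb]
        rw [hfil]
        have : (t.foldl max m) ⊔ x = t.foldl max m :=
          max_eq_left (le_trans hxm (pv_le_foldl_max t m))
        rw [this]

-- ===== VERDICT (by name: the statement is the Claim_ definition above) =====
theorem get_building_setting_sun_forward_spec : Claim_equal_get_building_setting_sun_forward := by
  intro arr _
  show get_building_setting_sun_forward arr = get_building_setting_sun_forward_alt arr
  induction arr using List.reverseRecOn with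
  | nil => rfl
  | append_singleton t x _ =>
      unfold get_building_setting_sun_forward_alt
      rw [List.reverse_append]
      simp only [List.reverse_singleton, List.singleton_append, List.foldl_cons]
      rw [show pvAltStep (([] : List Int), none) x = ([x], some x) by rfl, pvB_inv, pvA_snoc]
      simp
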